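-- pv_equiv track=rewrite | github.com/nknj/AfricanFilmsScraper | scraper/utils.py | clean_name_and_desc
-- ===== SOURCE A (Python) =====
-- def clean_name_and_desc(name_and_desc):
-- 	cleaned_name_and_desc = []
-- 	for x in name_and_desc:
-- 		x = x.strip()
-- 		if x not in ('About this film:', ''):
-- 			if x.lower().find('click here for') != -1:
-- 				return cleaned_name_and_desc
-- 			cleaned_name_and_desc.append(x)
-- 	return cleaned_name_and_desc
-- ===== SOURCE B (Python) =====
-- def clean_name_and_desc(name_and_desc):
--     kept = [x for x in (s.strip() for s in name_and_desc)
--             if x not in ('About this film:', '')]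
--     cut = next((i for i, x in enumerate(kept)
--                 if 'click here for' in x.lower()), len(kept))
--     return kept[:cut]
-- ===== Notes on version B (the rewrite author's own statement) =====
-- stated objective: idiomatic
-- what changed: Replaced the explicit loop with early return and in-loop append by a strip+filter comprehension followed by locating the first 'click here for' line and slicing the kept list up to it.
import Mathlib
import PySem

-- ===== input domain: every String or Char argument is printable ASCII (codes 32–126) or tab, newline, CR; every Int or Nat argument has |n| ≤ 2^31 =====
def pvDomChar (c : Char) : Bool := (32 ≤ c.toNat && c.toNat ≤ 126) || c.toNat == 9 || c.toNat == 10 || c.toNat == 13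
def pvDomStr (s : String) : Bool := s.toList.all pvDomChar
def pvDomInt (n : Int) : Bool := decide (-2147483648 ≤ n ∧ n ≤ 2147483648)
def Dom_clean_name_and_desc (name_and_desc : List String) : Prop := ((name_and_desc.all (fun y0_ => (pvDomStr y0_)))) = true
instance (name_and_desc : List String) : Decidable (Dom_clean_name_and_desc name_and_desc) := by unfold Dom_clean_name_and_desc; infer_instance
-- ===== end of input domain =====

-- B replaces A's loop with early return by a filter comprehension, a first-match index search and a slice (idiomatic decomposition; same cost).

-- ===== PORT A =====
-- the loop of A: accumulator `acc`, early return on the 'click here for' line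
def cleanGoA (acc : List String) : List String → List String
  | [] => acc
  | x :: rest =>
    let y := PySem.Str.strip x
    if y = "About this film:" ∨ y = "" then cleanGoA acc rest
    else if PySem.Str.find (PySem.Str.lower y) "click here for" ≠ -1 then acc
    else cleanGoA (acc ++ [y]) rest

def clean_name_and_desc (name_and_desc : List String) : List String :=
  cleanGoA [] name_and_desc

-- ===== PORT B =====
def clean_name_and_desc_alt (name_and_desc : List String) : List String :=
  let kept := (name_and_desc.map PySem.Str.strip).filter
      (fun x => !(x == "About this film:" || x == ""))
  -- `next((i for i, x in enumerate(kept) if 'click here for' in x.lower()), len(kept))` = findIdx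
  kept.take (kept.findIdx (fun x => PySem.Str.isIn "click here for" (PySem.Str.lower x)))

-- ===== PRECONDITION & SPEC =====
def Spec_clean_name_and_desc (name_and_desc : List String) (out : List String) : Prop := out = clean_name_and_desc_alt name_and_desc
instance (name_and_desc : List String) (out : List String) : Decidable (Spec_clean_name_and_desc name_and_desc out) := by unfold Spec_clean_name_and_desc; infer_instance

-- ===== CLAIM (what is proved, stated in full; the proofs are below) =====
def Claim_equal_clean_name_and_desc : Prop := ∀ (name_and_desc : List String), Dom_clean_name_and_desc name_and_desc → Spec_clean_name_and_desc name_and_desc (clean_name_and_desc name_and_desc)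

-- ===== LEMMAS AND PROOFS =====

theorem clean_contains_iff (y : String) :
    PySem.Str.isIn "click here for" (PySem.Str.lower y) = true ↔
      PySem.Str.find (PySem.Str.lower y) "click here for" ≠ -1 := by
  rw [PySem.Str.isIn_iff_infix, ← PySem.Str.find_ne_neg_one_iff]

theorem cleanGoA_eq (l : List String) : ∀ (acc : List String),
    cleanGoA acc l = acc ++ clean_name_and_desc_alt l := by
  induction l with
  | nil => intro acc; simp [cleanGoA, clean_name_and_desc_alt]
  | cons x rest ih =>
    intro acc
    by_cases hskip : PySem.Str.strip x = "About this film:" ∨ PySem.Str.strip x = ""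
    · have hb : (!(PySem.Str.strip x == "About this film:" || PySem.Str.strip x == "")) = false := by
        rcases hskip with h | h <;> simp [h]
      simp only [cleanGoA, clean_name_and_desc_alt, List.map_cons, List.filter_cons, hb,
        if_pos hskip, Bool.false_eq_true, if_false]
      exact ih acc
    · have hb : (!(PySem.Str.strip x == "About this film:" || PySem.Str.strip x == "")) = true := by
        rw [not_or] at hskip; simp [hskip.1, hskip.2]
      by_cases hsent : PySem.Str.find (PySem.Str.lower (PySem.Str.strip x)) "click here for" ≠ -1
      · have hp : (PySem.Str.isIn "click here for" (PySem.Str.lower (PySem.Str.strip x))) = true :=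
          (clean_contains_iff _).mpr hsent
        simp only [cleanGoA, clean_name_and_desc_alt, List.map_cons, List.filter_cons, hb,
          if_true, if_neg hskip, if_pos hsent, List.findIdx_cons, hp,
          Bool.cond_true, List.take_zero, List.append_nil]
      · have hp : (PySem.Str.isIn "click here for" (PySem.Str.lower (PySem.Str.strip x))) = false := by
          rw [Bool.eq_false_iff, Ne, clean_contains_iff]; simpa using hsent
        simp only [cleanGoA, clean_name_and_desc_alt, List.map_cons, List.filter_cons, hb,
          if_true, if_neg hskip, if_neg hsent, List.findIdx_cons, hp,
          Bool.cond_false, List.take_succ_cons]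
        rw [ih (acc ++ [PySem.Str.strip x])]
        simp [clean_name_and_desc_alt]

-- ===== VERDICT (by name: the statement is the Claim_ definition above) =====
theorem clean_name_and_desc_spec : Claim_equal_clean_name_and_desc := by
  intro l _
  unfold Spec_clean_name_and_desc clean_name_and_desc
  simpa using cleanGoA_eq l []
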